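-- pv_equiv track=rewrite | github.com/SierraActual/PythonAFProject | project.py | breakDownAcro
-- ===== SOURCE A (Python) =====
-- def breakDownMain(string):
--     # This will break down any string into individual words, stripping away spaces and puncuation.
--
--     # Remove punctuation and replace with spaces as those will get deleted later.
--     for char in range(len(string)):
--         if string[char] in ['!', ';', ',', '?', '.', '$', '-', '/', '(', ')', ':', '"', '\n']:
--             string = string.replace(string[char], ' ')
--
--     # Split the string by spaces.
--     noSpaces = string.split(' ')
--     # Get rid of any leftover spaces or blank entries.
--     while ' ' in noSpaces:
--         noSpaces.remove(' ')
--     while '' in noSpaces: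
--         noSpaces.remove('')
--     # Strip all items in list to remove spaces as well.
--     [item.strip() for item in noSpaces]
--
--     return noSpaces
--
-- def breakDownAcro(string):
--     # This will break down any string into individual words, stripping away spaces and puncuation, then determine which are all caps (acros).
--
--     # Perform all steps from breakDownMain in order to return a list of all words in the input.
--     list = breakDownMain(string)
--
--     # Now determine which words are acros (all caps) and get rid of the rest.
--     badWords = []
--     for item in list:
--         if not item.isupper():
--             badWords.append(item)
--     for word in badWords:
--         list.remove(word)
--
--
--     return list
-- ===== SOURCE B (Python) =====
-- SEPARATORS = {' ', '!', ';', ',', '?', '.', '$', '-', '/', '(', ')', ':', '"', '\n'}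
--
-- def breakDownAcro(string):
--     # One char-level pass: tokenize at separators and keep only all-caps tokens.
--     acros = []
--     buf = []
--     for ch in string:
--         if ch in SEPARATORS:
--             if buf:
--                 word = ''.join(buf)
--                 if word.isupper():
--                     acros.append(word)
--                 buf = []
--         else:
--             buf.append(ch)
--     if buf:
--         word = ''.join(buf)
--         if word.isupper():
--             acros.append(word)
--     return acros
-- ===== Notes on version B (the rewrite author's own statement) =====
-- stated objective: faster
-- what changed: Replaces A's four-pass pipeline (quadratic replace loop over indices, split, repeated list.remove scans to drop blanks, then a badWords list removed item-by-item with list.remove) by a single character-level scan that keeps a current-word buffer and appends it to the result when a separator ends an all-caps word.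
import Mathlib
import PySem

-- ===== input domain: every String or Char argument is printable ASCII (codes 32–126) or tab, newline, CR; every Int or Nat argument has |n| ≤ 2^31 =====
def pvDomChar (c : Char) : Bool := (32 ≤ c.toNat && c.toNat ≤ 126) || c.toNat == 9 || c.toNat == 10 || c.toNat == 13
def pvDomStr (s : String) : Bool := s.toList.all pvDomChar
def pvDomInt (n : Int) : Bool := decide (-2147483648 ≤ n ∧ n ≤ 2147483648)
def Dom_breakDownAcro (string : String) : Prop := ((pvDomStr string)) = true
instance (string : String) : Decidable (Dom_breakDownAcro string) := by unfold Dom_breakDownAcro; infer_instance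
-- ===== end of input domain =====

-- B replaces A's multi-pass translate/split/remove pipeline by one char-level scan with a word buffer (faster: drops A's repeated remove/replace passes).

-- str.isupper(), exact on the ASCII domain (the cased chars there are exactly a-z, A-Z):
-- at least one uppercase letter and no lowercase letter.
def upWord (cs : List Char) : Bool := cs.any PySem.Chars.isupper && !(cs.any PySem.Chars.islower)

def pyIsupper (s : String) : Bool := upWord s.toList

-- ===== PORT A =====
def aSeps : List Char := ['!', ';', ',', '?', '.', '$', '-', '/', '(', ')', ':', '"', '\n']

-- loop body of breakDownMain's for-loop over range(len(string))
def stepA (s : String) (i : Int) : String :=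
  match PySem.Str.pyGet? s i with
  | some c => if c ∈ aSeps then PySem.Str.replace s (String.ofList [c]) " " else s
  | none => s   -- unreachable: i < len(s) throughout the loop (replace keeps the length)

-- 'while v in xs: xs.remove(v)'  (remove? never fails when v ∈ xs; getD is a totality default)
def removeAllStr (xs : List String) (v : String) : List String :=
  if h : v ∈ xs then removeAllStr ((PySem.List.remove? xs v).getD xs) v else xs
termination_by xs.length
decreasing_by
  simp only [PySem.List.remove?_eq_some_erase xs v h, Option.getD_some]
  have h1 := List.length_erase_of_mem h
  have h2 : 0 < xs.length := List.length_pos_of_mem h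
  omega

def breakDownMain (string : String) : List String :=
  let s := (PySem.List.pyRange 0 (PySem.Str.len string) 1).foldl stepA string
  let noSpaces := (PySem.Str.split? s " ").getD []   -- s.split(' '); sep ≠ "" so never none
  let noSpaces := removeAllStr noSpaces " "
  let noSpaces := removeAllStr noSpaces ""
  -- [item.strip() for item in noSpaces] : value discarded by the Python, no effect
  noSpaces

def breakDownAcro (string : String) : List String :=
  let l := breakDownMain string
  let badWords := l.foldl (fun bw item => if !(pyIsupper item) then bw ++ [item] else bw) []
  badWords.foldl (fun l word =>
    match PySem.List.remove? l word with
    | some ys => ys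
    | none => l) l   -- none unreachable: every badWord is still in l

-- ===== PORT B =====
def bSeps : List Char := [' ', '!', ';', ',', '?', '.', '$', '-', '/', '(', ')', ':', '"', '\n']

def flushBuf (acc : List String) (buf : List Char) : List String :=
  if buf = [] then acc
  else if upWord buf then acc ++ [String.ofList buf] else acc

def scanAcro : List Char → List Char → List String → List String
  | [], buf, acc => flushBuf acc buf
  | c :: rest, buf, acc =>
      if c ∈ bSeps then scanAcro rest [] (flushBuf acc buf)
      else scanAcro rest (buf ++ [c]) acc

def breakDownAcro_alt (string : String) : List String := scanAcro string.toList [] []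

-- ===== PRECONDITION & SPEC =====
def Spec_breakDownAcro (string : String) (out : List String) : Prop := out = breakDownAcro_alt string
instance (string : String) (out : List String) : Decidable (Spec_breakDownAcro string out) := by unfold Spec_breakDownAcro; infer_instance

-- ===== CLAIM (what is proved, stated in full; the proofs are below) =====
def Claim_equal_breakDownAcro : Prop := ∀ (string : String), Dom_breakDownAcro string → Spec_breakDownAcro string (breakDownAcro string)

-- ===== LEMMAS AND PROOFS =====

-- characters already replaced (a subset S of aSeps) are mapped to ' '
def subS (S : List Char) (c : Char) : Char := if c ∈ S then ' ' else c

-- split at ' ' (Python str.split(' ') on the char level)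
def splitSp : List Char → List (List Char)
  | [] => [[]]
  | c :: cs =>
      if c = ' ' then [] :: splitSp cs
      else match splitSp cs with
        | [] => [[c]]
        | t :: ts => (c :: t) :: ts

-- the common normal form both programs compute
def tokensT (cs : List Char) : List String :=
  (((splitSp (cs.map (subS aSeps))).map String.ofList).filter (· ≠ "")).filter (fun s => pyIsupper s)

lemma splitSp_ne_nil (cs : List Char) : splitSp cs ≠ [] := by
  cases cs with
  | nil => simp [splitSp]
  | cons c cs =>
    by_cases h : c = ' '
    · simp [splitSp, h]
    · cases h2 : splitSp cs <;> simp [splitSp, h, h2]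

lemma replace_go_single (c d : Char) :
    ∀ (fuel : Nat) (l acc : List Char), l.length ≤ fuel →
      PySem.Chars.replace.go [c] [d] fuel l acc
        = acc.reverse ++ l.map (fun x => if x = c then d else x) := by
  intro fuel
  induction fuel with
  | zero =>
    intro l acc h
    have hl : l = [] := List.eq_nil_of_length_eq_zero (Nat.le_zero.mp h)
    subst hl
    simp [PySem.Chars.replace.go]
  | succ f ih =>
    intro l acc h
    cases l with
    | nil => simp [PySem.Chars.replace.go]
    | cons x t =>
      by_cases hx : x = c
      · subst hx
        have hpre : List.isPrefixOf [x] (x :: t) = true := by simp [List.isPrefixOf]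
        simp only [PySem.Chars.replace.go, hpre, if_true]
        rw [ih _ _ (by simpa using Nat.le_of_succ_le_succ h)]
        simp
      · have hpre : List.isPrefixOf [c] (x :: t) = false := by
          simp [List.isPrefixOf]
          exact fun hcx => (hx hcx.symm).elim
        simp only [PySem.Chars.replace.go, hpre, if_false, Bool.false_eq_true]
        rw [ih _ _ (by simpa using Nat.le_of_succ_le_succ h)]
        simp [hx]

lemma replace_single (cs : List Char) (c d : Char) :
    PySem.Chars.replace cs [c] [d] = cs.map (fun x => if x = c then d else x) := by
  simpa [PySem.Chars.replace] using replace_go_single c d cs.length cs [] le_rfl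

lemma loopA_inv (string : String) :
    ∀ n : Nat, n ≤ string.toList.length →
    ∃ S : List Char, (∀ c ∈ S, c ∈ aSeps) ∧
      ((PySem.List.pyRange 0 (n : Int) 1).foldl stepA string).toList
        = string.toList.map (subS S) ∧
      (∀ j, (hj : j < string.toList.length) → j < n →
        string.toList[j] ∈ aSeps → string.toList[j] ∈ S) := by
  intro n
  induction n with
  | zero =>
    intro _
    refine ⟨[], by simp, ?_, ?_⟩
    · have h0 : PySem.List.pyRange 0 ((0 : Nat) : Int) 1 = [] :=
        PySem.List.pyRange_one_eq_nil (by simp)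
      rw [h0]
      simp only [List.foldl_nil]
      rw [show subS [] = id from funext fun c => by simp [subS], List.map_id]
    · intro j hj h0
      exact absurd h0 (Nat.not_lt_zero j)
  | succ n ih =>
    intro hn
    obtain ⟨S, hS, hfold, hcov⟩ := ih (by omega)
    have hrange : PySem.List.pyRange 0 ((n + 1 : Nat) : Int) 1
        = PySem.List.pyRange 0 (n : Int) 1 ++ [(n : Int)] := by
      push_cast
      exact PySem.List.pyRange_one_succ_right (by positivity)
    rw [hrange, List.foldl_append]
    set s := (PySem.List.pyRange 0 (n : Int) 1).foldl stepA string with hs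
    have hn' : n < string.toList.length := by omega
    have hget : PySem.Str.pyGet? s (n : Int) = some (subS S string.toList[n]) := by
      rw [PySem.Str.pyGet?_natCast, hfold, List.getElem?_map,
        List.getElem?_eq_getElem hn']
      rfl
    by_cases hyS : string.toList[n] ∈ S
    · refine ⟨S, hS, ?_, ?_⟩
      · have hc : subS S string.toList[n] = ' ' := by simp [subS, hyS]
        simp only [List.foldl_cons, List.foldl_nil, stepA, hget, hc]
        rw [if_neg (by decide)]
        exact hfold
      · intro j hj hjn
        rcases Nat.lt_succ_iff_lt_or_eq.mp hjn with h' | h'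
        · exact hcov j hj h'
        · subst h'; exact fun _ => hyS
    · have hsub : subS S string.toList[n] = string.toList[n] := by simp [subS, hyS]
      by_cases hya : string.toList[n] ∈ aSeps
      · have hysp : string.toList[n] ≠ ' ' := by
          intro h; rw [h] at hya; exact absurd hya (by decide)
        refine ⟨string.toList[n] :: S, ?_, ?_, ?_⟩
        · intro c hc
          rcases List.mem_cons.mp hc with rfl | hc
          · exact hya
          · exact hS c hc
        · simp only [List.foldl_cons, List.foldl_nil, stepA, hget, hsub, if_pos hya]
          rw [PySem.Str.toList_replace, hfold]
          have h1 : (String.ofList [string.toList[n]]).toList = [string.toList[n]] :=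
            String.toList_ofList
          have h2 : (" " : String).toList = [' '] := rfl
          rw [h1, h2, replace_single, List.map_map]
          apply List.map_congr_left
          intro a _
          simp only [Function.comp_apply]
          by_cases haS : a ∈ S
          · have e1 : subS S a = ' ' := by simp [subS, haS]
            have e2 : subS (string.toList[n] :: S) a = ' ' := by
              simp [subS, List.mem_cons, haS]
            rw [e1, e2, if_neg (fun h => hysp h.symm)]
          · have e1 : subS S a = a := by simp [subS, haS]
            rw [e1]
            by_cases hay : a = string.toList[n]
            · rw [if_pos hay]
              symm
              simp [subS, hay]
            · rw [if_neg hay]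
              symm
              simp [subS, List.mem_cons, haS, hay]
        · intro j hj hjn
          rcases Nat.lt_succ_iff_lt_or_eq.mp hjn with h' | h'
          · exact fun hm => List.mem_cons_of_mem _ (hcov j hj h' hm)
          · subst h'; intro _; exact List.mem_cons_self ..
      · refine ⟨S, hS, ?_, ?_⟩
        · simp only [List.foldl_cons, List.foldl_nil, stepA, hget, hsub, if_neg hya]
          exact hfold
        · intro j hj hjn
          rcases Nat.lt_succ_iff_lt_or_eq.mp hjn with h' | h'
          · exact hcov j hj h'
          · subst h'; exact fun hm => absurd hm hya

lemma loopA_spec (string : String) :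
    ((PySem.List.pyRange 0 (PySem.Str.len string) 1).foldl stepA string).toList
      = string.toList.map (subS aSeps) := by
  obtain ⟨S, hS, hfold, hcov⟩ := loopA_inv string string.toList.length le_rfl
  rw [PySem.Str.len_eq, hfold]
  apply List.map_congr_left
  intro a ha
  obtain ⟨j, hj, hja⟩ := List.mem_iff_getElem.mp ha
  subst hja
  by_cases h1 : string.toList[j] ∈ S
  · simp [subS, h1, hS _ h1]
  · have h2 : string.toList[j] ∉ aSeps := fun h => h1 (hcov j hj hj h)
    simp [subS, h1, h2]

lemma splitSp_append_nosp (buf : List Char) (hb : ∀ c ∈ buf, ¬ c = ' ') :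
    ∀ l, splitSp (buf ++ l)
      = match splitSp l with
        | [] => [buf]
        | t :: ts => (buf ++ t) :: ts := by
  induction buf with
  | nil =>
    intro l
    simp only [List.nil_append]
    cases h : splitSp l with
    | nil => exact absurd h (splitSp_ne_nil l)
    | cons t ts => simp
  | cons c buf ih =>
    intro l
    have hc : ¬ c = ' ' := hb c (by simp)
    have hb' : ∀ x ∈ buf, ¬ x = ' ' := fun x hx => hb x (List.mem_cons_of_mem _ hx)
    simp only [List.cons_append, splitSp, if_neg hc, ih hb' l]
    cases h : splitSp l with
    | nil => simp
    | cons t ts => simp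

lemma splitSp_no_space (cs : List Char) : ∀ t ∈ splitSp cs, ' ' ∉ t := by
  induction cs with
  | nil =>
    intro t ht
    simp only [splitSp, List.mem_singleton] at ht
    subst ht; simp
  | cons c cs ih =>
    intro t ht
    by_cases hc : c = ' '
    · simp only [splitSp, if_pos hc] at ht
      rcases List.mem_cons.mp ht with rfl | ht
      · simp
      · exact ih t ht
    · simp only [splitSp, if_neg hc] at ht
      cases h : splitSp cs with
      | nil => exact absurd h (splitSp_ne_nil cs)
      | cons t0 ts =>
        rw [h] at ht
        rcases List.mem_cons.mp ht with rfl | ht2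
        · intro hsp
          rcases List.mem_cons.mp hsp with h' | h'
          · exact hc h'.symm
          · exact ih t0 (h ▸ List.mem_cons_self ..) h'
        · exact ih t (h ▸ List.mem_cons_of_mem t0 ht2)

lemma filter_erase_self (v : String) (xs : List String) :
    (xs.erase v).filter (· ≠ v) = xs.filter (· ≠ v) := by
  induction xs with
  | nil => simp
  | cons x xs ih =>
    by_cases hx : x = v
    · subst hx
      have h1 : (x :: xs).erase x = xs := by simp [List.erase_cons]
      rw [h1, List.filter_cons_of_neg (by simp)]
    · have h1 : (x :: xs).erase v = x :: xs.erase v := by simp [List.erase_cons, hx]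
      rw [h1, List.filter_cons_of_pos (by simp [hx]),
        List.filter_cons_of_pos (by simp [hx]), ih]

lemma removeAllStr_eq_filter (xs : List String) (v : String) :
    removeAllStr xs v = xs.filter (· ≠ v) := by
  suffices H : ∀ (n : Nat) (xs : List String), xs.length = n →
      removeAllStr xs v = xs.filter (· ≠ v) by
    exact H xs.length xs rfl
  intro n
  induction n using Nat.strong_induction_on with
  | _ n ih =>
    intro xs hL
    by_cases h : v ∈ xs
    · rw [removeAllStr, dif_pos h, PySem.List.remove?_eq_some_erase xs v h]
      simp only [Option.getD_some]
      rw [ih (xs.erase v).length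
        (by
          have h1 := List.length_erase_of_mem h
          have h2 := List.length_pos_of_mem h
          omega) (xs.erase v) rfl]
      exact filter_erase_self v xs
    · rw [removeAllStr, dif_neg h]
      symm
      rw [List.filter_eq_self]
      intro a ha
      simp only [ne_eq, decide_eq_true_eq]
      rintro rfl
      exact h ha

lemma fold_g_cons (x : String) :
    ∀ (ws xs : List String), (∀ w ∈ ws, w ≠ x) →
      ws.foldl (fun l word => match PySem.List.remove? l word with
        | some ys => ys | none => l) (x :: xs)
      = x :: ws.foldl (fun l word => match PySem.List.remove? l word with
        | some ys => ys | none => l) xs := by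
  intro ws
  induction ws with
  | nil => intro xs _; rfl
  | cons w ws ih =>
    intro xs hw
    have hwx : x ≠ w := fun h => (hw w (by simp)) h.symm
    simp only [List.foldl_cons]
    rw [PySem.List.remove?_cons_of_ne xs hwx]
    cases h : PySem.List.remove? xs w with
    | none =>
      simp only [h, Option.map_none]
      exact ih xs (fun w' h' => hw w' (List.mem_cons_of_mem _ h'))
    | some ys =>
      simp only [h, Option.map_some]
      exact ih ys (fun w' h' => hw w' (List.mem_cons_of_mem _ h'))

lemma erase_fold (q : String → Bool) (xs : List String) :
    (xs.filter q).foldl (fun l word => match PySem.List.remove? l word with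
      | some ys => ys | none => l) xs = xs.filter (fun x => !(q x)) := by
  induction xs with
  | nil => rfl
  | cons x xs ih =>
    by_cases hq : q x
    · rw [List.filter_cons_of_pos hq]
      simp only [List.foldl_cons, PySem.List.remove?_cons_self]
      rw [ih, List.filter_cons_of_neg (by simp [hq])]
    · rw [List.filter_cons_of_neg (by simp [hq])]
      rw [fold_g_cons x (xs.filter q) xs ?hne]
      · rw [ih, List.filter_cons_of_pos (by simp [hq])]
      case hne =>
        intro w hw
        have hqw : q w := List.of_mem_filter hw
        rintro rfl
        exact hq hqw

lemma mem_bSeps_iff (c : Char) : c ∈ bSeps ↔ c = ' ' ∨ c ∈ aSeps := by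
  show c ∈ ' ' :: aSeps ↔ _
  exact List.mem_cons

lemma subS_of_sep {c : Char} (hc : c ∈ bSeps) : subS aSeps c = ' ' := by
  rcases (mem_bSeps_iff c).mp hc with rfl | h
  · by_cases h : (' ' : Char) ∈ aSeps <;> simp [subS, h]
  · simp [subS, h]

lemma map_subS_nosep (buf : List Char) (hb : ∀ c ∈ buf, c ∉ bSeps) :
    buf.map (subS aSeps) = buf := by
  have h : ∀ c ∈ buf, subS aSeps c = id c := by
    intro c hc
    have : c ∉ aSeps := fun h => hb c hc ((mem_bSeps_iff c).mpr (Or.inr h))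
    simp [subS, this]
  rw [List.map_congr_left h, List.map_id]

lemma nosp_of_nosep (buf : List Char) (hb : ∀ c ∈ buf, c ∉ bSeps) :
    ∀ c ∈ buf, ¬ c = ' ' :=
  fun c hc h => hb c hc ((mem_bSeps_iff c).mpr (Or.inl h))

lemma ofList_ne_empty {buf : List Char} (h : buf ≠ []) : String.ofList buf ≠ "" := by
  intro he
  apply h
  have := congrArg String.toList he
  simpa [String.toList_ofList] using this

lemma flushBuf_append (acc : List String) (buf : List Char) :
    flushBuf acc buf = acc ++ flushBuf [] buf := by
  unfold flushBuf
  split_ifs <;> simp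

lemma tokensT_nosep (buf : List Char) (hb : ∀ c ∈ buf, c ∉ bSeps) :
    tokensT buf = flushBuf [] buf := by
  unfold tokensT
  rw [map_subS_nosep buf hb]
  have hsp : splitSp buf = [buf] := by
    have := splitSp_append_nosp buf (nosp_of_nosep buf hb) []
    simpa [splitSp] using this
  rw [hsp]
  by_cases hbuf : buf = []
  · subst hbuf
    simp [flushBuf, List.filter]
  · have hne : String.ofList buf ≠ "" := ofList_ne_empty hbuf
    by_cases hup : upWord buf <;>
      simp [flushBuf, hbuf, hne, hup, pyIsupper, String.toList_ofList, List.filter]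

lemma tokensT_sep (buf : List Char) (hb : ∀ c ∈ buf, c ∉ bSeps)
    {c : Char} (hc : c ∈ bSeps) (rest : List Char) :
    tokensT (buf ++ c :: rest) = flushBuf [] buf ++ tokensT rest := by
  unfold tokensT
  rw [List.map_append, map_subS_nosep buf hb]
  simp only [List.map_cons, subS_of_sep hc]
  rw [splitSp_append_nosp buf (nosp_of_nosep buf hb) (' ' :: rest.map (subS aSeps))]
  have h1 : splitSp (' ' :: rest.map (subS aSeps))
      = [] :: splitSp (rest.map (subS aSeps)) := by simp [splitSp]
  rw [h1]
  simp only [List.append_nil, List.map_cons]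
  by_cases hbuf : buf = []
  · subst hbuf
    simp [flushBuf, List.filter]
  · have hne : String.ofList buf ≠ "" := ofList_ne_empty hbuf
    by_cases hup : upWord buf <;>
      simp [flushBuf, hbuf, hne, hup, pyIsupper, String.toList_ofList, List.filter_cons]

lemma scan_spec : ∀ (cs buf : List Char) (acc : List String),
    (∀ c ∈ buf, c ∉ bSeps) →
    scanAcro cs buf acc = acc ++ tokensT (buf ++ cs) := by
  intro cs
  induction cs with
  | nil =>
    intro buf acc hb
    simp only [scanAcro, List.append_nil, tokensT_nosep buf hb]
    exact flushBuf_append acc buf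
  | cons c rest ih =>
    intro buf acc hb
    by_cases hc : c ∈ bSeps
    · simp only [scanAcro, if_pos hc]
      rw [ih [] (flushBuf acc buf) (by simp)]
      rw [tokensT_sep buf hb hc rest, flushBuf_append acc buf]
      simp [List.append_assoc]
    · simp only [scanAcro, if_neg hc]
      rw [ih (buf ++ [c]) acc ?hok]
      · rw [List.append_assoc]
        simp
      case hok =>
        intro x hx
        rcases List.mem_append.mp hx with h | h
        · exact hb x h
        · simp only [List.mem_singleton] at h
          subst h; exact hc

lemma splitOn_go_space : ∀ (fuel : Nat) (l cur : List Char) (acc : List (List Char)),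
    l.length < fuel →
    PySem.Chars.splitOn.go [' '] fuel l cur acc
      = acc.reverse ++ (match splitSp l with
          | [] => [cur.reverse]
          | t :: ts => (cur.reverse ++ t) :: ts) := by
  intro fuel
  induction fuel with
  | zero => intro l cur acc h; exact absurd h (Nat.not_lt_zero _)
  | succ f ih =>
    intro l cur acc h
    cases l with
    | nil => simp [PySem.Chars.splitOn.go, splitSp]
    | cons ch rest =>
      by_cases hch : ch = ' '
      · subst hch
        have hpre : List.isPrefixOf [' '] (' ' :: rest) = true := by
          simp [List.isPrefixOf]
        simp only [PySem.Chars.splitOn.go, hpre, if_true]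
        have hdrop : List.drop ([' '] : List Char).length (' ' :: rest) = rest := by simp
        rw [hdrop, ih rest [] (cur.reverse :: acc) (by simpa using Nat.lt_of_succ_lt_succ h)]
        cases hsp : splitSp rest with
        | nil => exact absurd hsp (splitSp_ne_nil rest)
        | cons t ts => simp [splitSp, hsp]
      · have hpre : List.isPrefixOf [' '] (ch :: rest) = false := by
          simp [List.isPrefixOf]
          exact fun h' => hch h'.symm
        simp only [PySem.Chars.splitOn.go, hpre, if_false, Bool.false_eq_true]
        rw [ih rest (ch :: cur) acc (by simpa using Nat.lt_of_succ_lt_succ h)]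
        cases hsp : splitSp rest with
        | nil => simp [splitSp, hsp, hch]
        | cons t ts => simp [splitSp, hsp, hch]

lemma splitOn_space (cs : List Char) : PySem.Chars.splitOn cs [' '] = splitSp cs := by
  show PySem.Chars.splitOn.go [' '] (cs.length + 1) cs [] [] = splitSp cs
  rw [splitOn_go_space (cs.length + 1) cs [] [] (by omega)]
  cases h : splitSp cs with
  | nil => exact absurd h (splitSp_ne_nil cs)
  | cons t ts => simp

lemma split_s (s : String) :
    (PySem.Str.split? s " ").getD [] = (splitSp s.toList).map String.ofList := by
  have h := PySem.Str.split?_map s " "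
  have h2 : PySem.Chars.split? s.toList ((" " : String).toList)
      = some (splitSp s.toList) := by
    have he : (" " : String).toList = [' '] := rfl
    rw [he]
    simp [PySem.Chars.split?, splitOn_space]
  rw [h2] at h
  cases hs : PySem.Str.split? s " " with
  | none => rw [hs] at h; simp at h
  | some ws =>
    rw [hs] at h
    simp only [Option.map_some, Option.some.injEq] at h
    rw [Option.getD_some, ← h, List.map_map]
    have hid : ∀ w ∈ ws, (String.ofList ∘ String.toList) w = id w :=
      fun w _ => String.ofList_toList
    rw [List.map_congr_left hid, List.map_id]

lemma filter_space_id (L : List Char) :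
    ((splitSp L).map String.ofList).filter (· ≠ " ") = (splitSp L).map String.ofList := by
  rw [List.filter_eq_self]
  intro a ha
  obtain ⟨t, ht, rfl⟩ := List.mem_map.mp ha
  simp only [ne_eq, decide_eq_true_eq]
  intro h
  have ht' : t = [' '] := by
    have := congrArg String.toList h
    simpa [String.toList_ofList] using this
  exact splitSp_no_space L t ht (ht' ▸ (by simp))

lemma main_eq (string : String) :
    breakDownMain string
      = ((splitSp (string.toList.map (subS aSeps))).map String.ofList).filter (· ≠ "") := by
  simp only [breakDownMain]
  rw [split_s, loopA_spec, removeAllStr_eq_filter, removeAllStr_eq_filter,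
    filter_space_id]

lemma A_eq_tokensT (string : String) : breakDownAcro string = tokensT string.toList := by
  simp only [breakDownAcro]
  rw [PySem.List.foldl_append_if (fun item => !(pyIsupper item)) (fun item => item)]
  simp only [List.nil_append]
  have hmap : List.map (fun item => item)
      ((breakDownMain string).filter (fun item => !(pyIsupper item)))
      = (breakDownMain string).filter (fun item => !(pyIsupper item)) := by
    simp
  rw [hmap, erase_fold (fun item => !(pyIsupper item)) (breakDownMain string)]
  rw [main_eq]
  unfold tokensT
  simp [Bool.not_not]

-- ===== VERDICT (by name: the statement is the Claim_ definition above) =====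
theorem breakDownAcro_spec : Claim_equal_breakDownAcro := by
  intro string _
  unfold Spec_breakDownAcro breakDownAcro_alt
  rw [A_eq_tokensT, scan_spec string.toList [] [] (by simp)]
  simp
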